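-- pv_equiv track=rewrite | github.com/Prometheus-Frameworks/TIBER-Rookies | scripts/compute_historical_comps.py | build_methodology_compatible_by_position
-- ===== SOURCE A (Python) =====
-- from typing import Any
--
-- PRODUCTION_SCOPE_COMPATIBLE: frozenset[str] = frozenset()
--
-- def build_methodology_compatible_by_position(
--     positions: set[str], historical_features: list[dict[str, Any]], production_scope_compatible: frozenset[str] = PRODUCTION_SCOPE_COMPATIBLE
-- ) -> dict[str, bool]:
--     output: dict[str, bool] = {}
--     for position in sorted(positions):
--         position_rows = [row for row in historical_features if row.get("position") == position]
--         output[position] = bool(position_rows) and all(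
--             row.get("normalization_scope") in production_scope_compatible for row in position_rows
--         )
--     return output
-- ===== SOURCE B (Python) =====
-- PRODUCTION_SCOPE_COMPATIBLE: frozenset = frozenset()
--
-- def build_methodology_compatible_by_position(
--     positions, historical_features, production_scope_compatible=PRODUCTION_SCOPE_COMPATIBLE
-- ):
--     # One pass over the rows: per position, track whether every row seen so far is compatible.
--     status = {}
--     for row in historical_features:
--         pos = row.get("position")
--         if pos is None:
--             continue
--         compatible = row.get("normalization_scope") in production_scope_compatible
--         status[pos] = status.get(pos, True) and compatible
--     return {position: status.get(position, False) for position in sorted(positions)}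
-- ===== Notes on version B (the rewrite author's own statement) =====
-- stated objective: faster
-- what changed: Instead of scanning all historical rows once per position, B makes a single pass over the rows accumulating a per-position compatibility status in a dict, then answers each sorted position by one lookup.
import Mathlib
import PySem

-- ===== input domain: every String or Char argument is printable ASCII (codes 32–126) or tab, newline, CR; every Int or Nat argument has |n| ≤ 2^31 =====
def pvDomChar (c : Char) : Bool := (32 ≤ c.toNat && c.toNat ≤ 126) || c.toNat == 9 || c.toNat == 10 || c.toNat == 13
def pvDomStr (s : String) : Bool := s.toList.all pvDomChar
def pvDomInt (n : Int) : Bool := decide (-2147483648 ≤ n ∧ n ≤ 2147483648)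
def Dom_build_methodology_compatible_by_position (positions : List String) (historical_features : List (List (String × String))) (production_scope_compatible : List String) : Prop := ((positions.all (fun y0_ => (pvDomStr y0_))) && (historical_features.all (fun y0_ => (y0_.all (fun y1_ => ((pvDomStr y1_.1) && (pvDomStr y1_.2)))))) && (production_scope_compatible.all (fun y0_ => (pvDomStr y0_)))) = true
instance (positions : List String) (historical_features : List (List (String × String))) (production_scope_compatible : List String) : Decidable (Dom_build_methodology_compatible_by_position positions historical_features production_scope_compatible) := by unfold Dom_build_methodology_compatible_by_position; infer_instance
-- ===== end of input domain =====

-- B replaces A's per-position scan of all rows by one grouping pass over the rows plus a lookup per sorted position (measured faster; asymptotically O(N + P log P) vs O(P*N)).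

-- ===== PORT A =====
def build_methodology_compatible_by_position (positions : List String) (historical_features : List (List (String × String))) (production_scope_compatible : List String) : List (String × Bool) :=
  ((PySem.List.sorted positions (fun x => x) false).foldl
    (fun output position =>
      let position_rows := historical_features.filter
        (fun row => (PySem.Dict.mk row).get? "position" == some position)
      output.insert position
        (!position_rows.isEmpty &&
          position_rows.all (fun row =>
            match (PySem.Dict.mk row).get? "normalization_scope" with
            | some v => production_scope_compatible.contains v
            | none => false)))
    PySem.Dict.empty).items

-- ===== PORT B =====
-- B's first pass: per-position running conjunction of row compatibility.
def bmcbpStatus (historical_features : List (List (String × String))) (production_scope_compatible : List String) : PySem.Dict String Bool :=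
  historical_features.foldl
    (fun status row =>
      match (PySem.Dict.mk row).get? "position" with
      | none => status
      | some pos =>
        status.insert pos
          (status.getD pos true &&
            (match (PySem.Dict.mk row).get? "normalization_scope" with
             | some v => production_scope_compatible.contains v
             | none => false)))
    PySem.Dict.empty

def build_methodology_compatible_by_position_alt (positions : List String) (historical_features : List (List (String × String))) (production_scope_compatible : List String) : List (String × Bool) :=
  let status := bmcbpStatus historical_features production_scope_compatible
  ((PySem.List.sorted positions (fun x => x) false).foldl
    (fun out position => out.insert position (status.getD position false))
    PySem.Dict.empty).items

-- ===== PRECONDITION & SPEC =====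
def Spec_build_methodology_compatible_by_position (positions : List String) (historical_features : List (List (String × String))) (production_scope_compatible : List String) (out : List (String × Bool)) : Prop := out = build_methodology_compatible_by_position_alt positions historical_features production_scope_compatible
instance (positions : List String) (historical_features : List (List (String × String))) (production_scope_compatible : List String) (out : List (String × Bool)) : Decidable (Spec_build_methodology_compatible_by_position positions historical_features production_scope_compatible out) := by unfold Spec_build_methodology_compatible_by_position; infer_instance

-- ===== CLAIM (what is proved, stated in full; the proofs are below) =====
def Claim_equal_build_methodology_compatible_by_position : Prop := ∀ (positions : List String) (historical_features : List (List (String × String))) (production_scope_compatible : List String), Dom_build_methodology_compatible_by_position positions historical_features production_scope_compatible → Spec_build_methodology_compatible_by_position positions historical_features production_scope_compatible (build_methodology_compatible_by_position positions historical_features production_scope_compatible)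

-- ===== LEMMAS AND PROOFS =====

-- per-row compatibility test shared by the statements below
def bmcbpCompat (production_scope_compatible : List String) (row : List (String × String)) : Bool :=
  match (PySem.Dict.mk row).get? "normalization_scope" with
  | some v => production_scope_compatible.contains v
  | none => false

-- invariant of B's grouping pass: the status entry for p is the conjunction over the rows matching p
lemma bmcbpStatus_get (production_scope_compatible : List String) (p : String) :
    ∀ (hf : List (List (String × String))) (d : PySem.Dict String Bool),
    (hf.foldl
      (fun status row =>
        match (PySem.Dict.mk row).get? "position" with
        | none => status
        | some pos => status.insert pos (status.getD pos true && bmcbpCompat production_scope_compatible row))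
      d).get? p =
    (let rows := hf.filter (fun row => (PySem.Dict.mk row).get? "position" == some p)
     if rows.isEmpty then d.get? p
     else some (d.getD p true && rows.all (bmcbpCompat production_scope_compatible))) := by
  intro hf
  induction hf with
  | nil => intro d; simp
  | cons row rest ih =>
    intro d
    simp only [List.foldl_cons, List.filter_cons]
    cases hpos : (PySem.Dict.mk row).get? "position" with
    | none =>
      simp only
      rw [show ((none : Option String) == some p) = false from rfl]
      simp only [Bool.false_eq_true, if_false]
      exact ih d
    | some pos =>
      by_cases hp : pos = p
      · subst hp
        simp only
        rw [show ((some pos : Option String) == some pos) = true from by simp]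
        simp only [if_true, List.isEmpty_cons, List.all_cons]
        rw [ih]
        simp only [PySem.Dict.get?_insert_self, PySem.Dict.getD_insert_self]
        cases hre : (rest.filter (fun row => (PySem.Dict.mk row).get? "position" == some pos)).isEmpty
        · simp only [Bool.false_eq_true, if_false]
          rw [Bool.and_assoc]
        · simp only [if_true]
          have h0 : rest.filter (fun row => (PySem.Dict.mk row).get? "position" == some pos) = [] :=
            List.isEmpty_iff.mp hre
          simp [h0]
      · simp only
        rw [show ((some pos : Option String) == some p) = false from by simp [hp]]
        simp only [Bool.false_eq_true, if_false]
        rw [ih]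
        rw [PySem.Dict.get?_insert_of_ne _ _ (Ne.symm hp), PySem.Dict.getD_insert_of_ne _ _ _ (Ne.symm hp)]

-- per-position agreement: A's filtered-scan value equals B's status lookup
lemma bmcbp_value_eq (historical_features : List (List (String × String))) (production_scope_compatible : List String) (p : String) :
    (let position_rows := historical_features.filter
       (fun row => (PySem.Dict.mk row).get? "position" == some p)
     (!position_rows.isEmpty && position_rows.all (bmcbpCompat production_scope_compatible)))
    = (bmcbpStatus historical_features production_scope_compatible).getD p false := by
  rw [PySem.Dict.getD_eq_get?_getD]
  show _ = ((historical_features.foldl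
      (fun status row =>
        match (PySem.Dict.mk row).get? "position" with
        | none => status
        | some pos => status.insert pos (status.getD pos true && bmcbpCompat production_scope_compatible row))
      PySem.Dict.empty).get? p).getD false
  rw [bmcbpStatus_get]
  cases he : (historical_features.filter (fun row => (PySem.Dict.mk row).get? "position" == some p)).isEmpty
  · simp [he]
  · simp [he]

-- ===== VERDICT (by name: the statement is the Claim_ definition above) =====
theorem build_methodology_compatible_by_position_spec : Claim_equal_build_methodology_compatible_by_position := by
  intro positions historical_features production_scope_compatible _
  unfold Spec_build_methodology_compatible_by_position
  unfold build_methodology_compatible_by_position build_methodology_compatible_by_position_alt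
  have hfun : (fun (output : PySem.Dict String Bool) (position : String) =>
      let position_rows := historical_features.filter
        (fun row => (PySem.Dict.mk row).get? "position" == some position)
      output.insert position
        (!position_rows.isEmpty &&
          position_rows.all (fun row =>
            match (PySem.Dict.mk row).get? "normalization_scope" with
            | some v => production_scope_compatible.contains v
            | none => false)))
    = (fun (out : PySem.Dict String Bool) (position : String) =>
        out.insert position ((bmcbpStatus historical_features production_scope_compatible).getD position false)) := by
    funext out p
    exact congrArg (PySem.Dict.insert out p) (bmcbp_value_eq historical_features production_scope_compatible p)
  rw [hfun]
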